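-- pv_equiv track=rewrite | github.com/lara20000113/usenix2026 | TarguessI.py | Parting
-- ===== SOURCE A (Python) =====
-- def Parting(baseStructure):
--     # Variables Definition
--     baseStructure, structure, tmpIndex = baseStructure + '\n', [], 0
--     while baseStructure[tmpIndex].isupper():
--         string, tmpIndex = baseStructure[tmpIndex], tmpIndex + 1
--         while baseStructure[tmpIndex].isdigit():
--             string, tmpIndex = string + baseStructure[tmpIndex], tmpIndex + 1
--         structure.append(string)
--     return structure
-- ===== SOURCE B (Python) =====
-- def Parting(baseStructure):
--     # Stage 1: length of the longest valid prefix (uppercase letters, digits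
--     # allowed anywhere but first position; break ends the scan).
--     end = 0
--     for ch in baseStructure:
--         if ch.isupper() or (ch.isdigit() and end > 0):
--             end += 1
--         else:
--             break
--     prefix = baseStructure[:end]
--     # Stage 2: token boundaries are the positions of the uppercase letters.
--     starts = [i for i, ch in enumerate(prefix) if ch.isupper()]
--     # Stage 3: slice the prefix between consecutive boundaries.
--     return [prefix[s:e] for s, e in zip(starts, starts[1:] + [end])]
-- ===== Notes on version B (the rewrite author's own statement) =====
-- stated objective: alternative
-- what changed: Replaced the single tokenizing scan (nested index-walking while loops that grow the current token) by three staged passes: first compute the length of the valid prefix with a positional predicate, then collect the uppercase positions as token boundaries, then slice the prefix between consecutive boundaries.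
import Mathlib
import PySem

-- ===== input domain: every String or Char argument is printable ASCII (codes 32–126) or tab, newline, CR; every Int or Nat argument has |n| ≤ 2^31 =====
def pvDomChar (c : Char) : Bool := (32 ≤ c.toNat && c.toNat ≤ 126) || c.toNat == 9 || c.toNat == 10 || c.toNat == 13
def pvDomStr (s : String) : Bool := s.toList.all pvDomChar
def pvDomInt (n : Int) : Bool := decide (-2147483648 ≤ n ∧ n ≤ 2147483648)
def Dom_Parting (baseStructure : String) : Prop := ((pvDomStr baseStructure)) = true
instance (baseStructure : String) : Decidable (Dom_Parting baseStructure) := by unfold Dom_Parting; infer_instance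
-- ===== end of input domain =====

-- B replaces A's single tokenizing scan (nested index-walking while loops that grow the current
-- token) by three staged passes: valid-prefix length, uppercase boundary positions, slices
-- between consecutive boundaries; objective: alternative decomposition, same cost.


-- ===== PORT A =====
-- inner while: consume the run of digits (the digits read, then the rest)
def pvSpanDig : List Char → List Char × List Char
  | [] => ([], [])
  | c :: cs =>
    if PySem.Chars.isdigit c then
      let p := pvSpanDig cs
      (c :: p.1, p.2)
    else ([], c :: cs)

-- termination fact cited by pvPartA's decreasing_by
theorem pvSpanDig_snd_length (cs : List Char) : (pvSpanDig cs).2.length ≤ cs.length := by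
  induction cs with
  | nil => simp [pvSpanDig]
  | cons c cs ih =>
    by_cases h : PySem.Chars.isdigit c = true
    · simp [pvSpanDig, h]; omega
    · simp [pvSpanDig, h]

-- outer while over the char list (index advance = structural recursion)
def pvPartA : List Char → List String
  | [] => []
  | c :: cs =>
    if PySem.Chars.isupper c then
      String.ofList (c :: (pvSpanDig cs).1) :: pvPartA (pvSpanDig cs).2
    else []
  termination_by cs => cs.length
  decreasing_by
    simp only [List.length_cons]
    exact Nat.lt_succ_of_le (pvSpanDig_snd_length cs)

def Parting (baseStructure : String) : List String :=
  pvPartA (baseStructure.toList ++ ['\n'])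

-- ===== PORT B =====
-- stage 1: the for-loop with break; `end` is a counter starting at 0, kept as a Nat (it is never negative)
def pvEnd : List Char → Nat → Nat
  | [], e => e
  | c :: cs, e =>
    if PySem.Chars.isupper c || (PySem.Chars.isdigit c && decide (0 < e)) then
      pvEnd cs (e + 1)
    else e

def Parting_alt (baseStructure : String) : List String :=
  let cs := baseStructure.toList
  let e : Int := (pvEnd cs 0 : Nat)
  let pre := PySem.List.slice cs none (some e)                 -- baseStructure[:end]
  let starts := (PySem.List.enumerate pre 0).filterMap         -- [i for i,ch in enumerate(prefix) if ch.isupper()]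
    (fun p => if PySem.Chars.isupper p.2 then some p.1 else none)
  (starts.zip (PySem.List.slice starts (some 1) none ++ [e])).map   -- zip(starts, starts[1:] + [end])
    (fun p => String.ofList (PySem.List.slice pre (some p.1) (some p.2)))   -- prefix[s:e]

-- ===== PRECONDITION & SPEC =====
def Spec_Parting (baseStructure : String) (out : List String) : Prop := out = Parting_alt baseStructure
instance (baseStructure : String) (out : List String) : Decidable (Spec_Parting baseStructure out) := by unfold Spec_Parting; infer_instance

-- ===== CLAIM (what is proved, stated in full; the proofs are below) =====
def Claim_equal_Parting : Prop := ∀ (baseStructure : String), Dom_Parting baseStructure → Spec_Parting baseStructure (Parting baseStructure)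

-- ===== LEMMAS AND PROOFS =====

theorem pv_digit_not_upper (c : Char) : PySem.Chars.isdigit c = true → PySem.Chars.isupper c = false := by
  simp only [PySem.Chars.isdigit, PySem.Chars.isupper, Bool.and_eq_true, decide_eq_true_eq,
    Bool.and_eq_false_iff, decide_eq_false_iff_not]
  rintro ⟨_, h9⟩
  exact Or.inl (not_le.mpr (lt_of_le_of_lt h9 (by decide)))

-- Nat-level view of stage 2: positions of the uppercase chars
def pvStartsNat : List Char → List Nat
  | [] => []
  | c :: cs =>
    if PySem.Chars.isupper c then 0 :: (pvStartsNat cs).map (· + 1)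
    else (pvStartsNat cs).map (· + 1)

-- Nat-level view of stage 3
def pvNatTokens (pre : List Char) (e : Nat) : List (List Char) :=
  ((pvStartsNat pre).zip ((pvStartsNat pre).tail ++ [e])).map
    (fun p => (pre.drop p.1).take (p.2 - p.1))

-- Nat-level view of stage 1: once e > 0 a char is accepted iff uppercase or digit
def pvLen : List Char → Nat
  | [] => 0
  | c :: cs => if PySem.Chars.isupper c || PySem.Chars.isdigit c then pvLen cs + 1 else 0

theorem pvEnd_pos (cs : List Char) : ∀ e, 1 ≤ e → pvEnd cs e = e + pvLen cs := by
  induction cs with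
  | nil => intro e _; simp [pvEnd, pvLen]
  | cons c cs ih =>
    intro e he
    by_cases h : (PySem.Chars.isupper c || PySem.Chars.isdigit c) = true
    · have hc : (PySem.Chars.isupper c || (PySem.Chars.isdigit c && decide (0 < e))) = true := by
        rcases Bool.or_eq_true_iff.mp h with h' | h' <;>
          simp [h', Nat.lt_of_lt_of_le Nat.zero_lt_one he]
      rw [pvEnd, if_pos hc, ih (e + 1) (by omega), pvLen, if_pos h]; omega
    · have h' : (PySem.Chars.isupper c || PySem.Chars.isdigit c) = false := by
        simpa using h
      have hc : (PySem.Chars.isupper c || (PySem.Chars.isdigit c && decide (0 < e))) = false := by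
        simp only [Bool.or_eq_false_iff, Bool.and_eq_false_iff] at h' ⊢
        exact ⟨h'.1, Or.inl h'.2⟩
      rw [pvEnd, if_neg (by simp [hc]), pvLen, if_neg (by simp [h'])]
      omega
  
theorem pvEnd_zero (c : Char) (cs : List Char) :
    pvEnd (c :: cs) 0 = if PySem.Chars.isupper c then 1 + pvLen cs else 0 := by
  by_cases h : PySem.Chars.isupper c = true
  · rw [pvEnd, if_pos (by simp [h]), pvEnd_pos cs 1 le_rfl, if_pos h]
  · rw [pvEnd, if_neg (by simp [h]), if_neg h]

theorem pvLen_le (cs : List Char) : pvLen cs ≤ cs.length := by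
  induction cs with
  | nil => simp [pvLen]
  | cons c cs ih =>
    rw [pvLen]
    split
    · simp; omega
    · simp

-- B's filterMap over PySem.List.enumerate is pvStartsNat, cast to Int and shifted by the start
theorem pvStarts_eq (cs : List Char) : ∀ s : Int,
    (PySem.List.enumerate cs s).filterMap
      (fun p => if PySem.Chars.isupper p.2 then some p.1 else none)
    = (pvStartsNat cs).map (fun k : Nat => s + (k : Int)) := by
  induction cs with
  | nil => intro s; simp [PySem.List.enumerate_nil, pvStartsNat]
  | cons c cs ih =>
    intro s
    rw [PySem.List.enumerate_cons, List.filterMap_cons, pvStartsNat]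
    by_cases h : PySem.Chars.isupper c = true
    · simp only [h, if_true, ih (s + 1), List.map_cons, List.map_map]
      refine congrArg₂ _ (by simp) (List.map_congr_left ?_)
      intro a _
      simp only [Function.comp_apply]
      push_cast
      ring
    · simp only [h, Bool.false_eq_true, if_false, ih (s + 1), List.map_map]
      refine List.map_congr_left ?_
      intro a _
      simp only [Function.comp_apply]
      push_cast
      ring

-- facts pvSpanDig provides about its split
theorem pvSpanDig_append (cs : List Char) : (pvSpanDig cs).1 ++ (pvSpanDig cs).2 = cs := by
  induction cs with
  | nil => simp [pvSpanDig]
  | cons c cs ih =>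
    by_cases h : PySem.Chars.isdigit c = true
    · simp [pvSpanDig, h, ih]
    · simp [pvSpanDig, h]

theorem pvSpanDig_fst_digit (cs : List Char) :
    ∀ c ∈ (pvSpanDig cs).1, PySem.Chars.isdigit c = true := by
  induction cs with
  | nil => simp [pvSpanDig]
  | cons c cs ih =>
    by_cases h : PySem.Chars.isdigit c = true
    · simp only [pvSpanDig, h, if_pos, List.mem_cons]
      rintro d (rfl | hd)
      · exact h
      · exact ih d hd
    · simp [pvSpanDig, h]

theorem pvSpanDig_snd_head (cs : List Char) (c : Char) (cs' : List Char)
    (h : (pvSpanDig cs).2 = c :: cs') : PySem.Chars.isdigit c = false := by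
  induction cs with
  | nil => simp [pvSpanDig] at h
  | cons d cs ih =>
    by_cases hd : PySem.Chars.isdigit d = true
    · simp [pvSpanDig, hd] at h; exact ih h
    · simp [pvSpanDig, hd] at h
      simpa [h.1] using hd

-- A's sentinel '\n' survives untouched behind the digit run
theorem pvSpanDig_append_newline (cs : List Char) :
    pvSpanDig (cs ++ ['\n']) = ((pvSpanDig cs).1, (pvSpanDig cs).2 ++ ['\n']) := by
  induction cs with
  | nil => simp [pvSpanDig, show PySem.Chars.isdigit '\n' = false from by decide]
  | cons c cs ih =>
    by_cases h : PySem.Chars.isdigit c = true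
    · simp [pvSpanDig, h, ih]
    · simp [pvSpanDig, h]

-- pvLen walks straight through a run of digits
theorem pvLen_digits_append (d q : List Char) (hd : ∀ c ∈ d, PySem.Chars.isdigit c = true) :
    pvLen (d ++ q) = d.length + pvLen q := by
  induction d with
  | nil => simp
  | cons c d ih =>
    have hc := hd c (List.mem_cons_self ..)
    rw [List.cons_append, pvLen, if_pos (by simp [hc]),
      ih (fun x hx => hd x (List.mem_cons_of_mem _ hx))]
    simp; omega

-- stage 1 restarted on the remainder (whose head is not a digit) agrees with pvLen
theorem pvEnd_zero_eq_pvLen (r : List Char)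
    (hr : ∀ c cs', r = c :: cs' → PySem.Chars.isdigit c = false) :
    pvEnd r 0 = pvLen r := by
  match r with
  | [] => simp [pvEnd, pvLen]
  | c :: cs =>
    have hc := hr c cs rfl
    by_cases h : PySem.Chars.isupper c = true
    · rw [pvEnd_zero, if_pos h, pvLen, if_pos (by simp [h])]; omega
    · rw [pvEnd_zero, if_neg h, pvLen, if_neg (by simp [h, hc])]

-- pvStartsNat skips a run of non-uppercase chars, shifting the indices
theorem pvStartsNat_append_nonupper (d q : List Char)
    (hd : ∀ c ∈ d, PySem.Chars.isupper c = false) :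
    pvStartsNat (d ++ q) = (pvStartsNat q).map (· + d.length) := by
  induction d with
  | nil => simp
  | cons c d ih =>
    have hc := hd c (List.mem_cons_self ..)
    rw [List.cons_append, pvStartsNat, if_neg (by simp [hc]),
      ih (fun x hx => hd x (List.mem_cons_of_mem _ hx)), List.map_map]
    refine List.map_congr_left ?_
    intro a _; simp; omega

-- the key splitting step: one token (uppercase char + its digit run), then the rest of the prefix
theorem pvNatTokens_cons (c : Char) (d q : List Char)
    (hc : PySem.Chars.isupper c = true)
    (hd : ∀ x ∈ d, PySem.Chars.isupper x = false)
    (hqh : ∀ x t, q = x :: t → PySem.Chars.isupper x = true) :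
    pvNatTokens (c :: d ++ q) (d.length + 1 + q.length) = (c :: d) :: pvNatTokens q q.length := by
  have hst : pvStartsNat (c :: d ++ q) = 0 :: (pvStartsNat q).map (· + (d.length + 1)) := by
    rw [show (c :: d ++ q) = c :: (d ++ q) from rfl, pvStartsNat, if_pos hc,
      pvStartsNat_append_nonupper d q hd, List.map_map]
    refine congrArg _ (List.map_congr_left ?_)
    intro a _; simp [Function.comp]; omega
  match q, hqh with
  | [], _ =>
    simp only [List.append_nil, List.length_nil, Nat.add_zero] at hst ⊢
    unfold pvNatTokens
    rw [hst]
    simp only [pvStartsNat, List.map_nil, List.tail_cons, List.nil_append, List.zip_cons_cons,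
      List.zip_nil_right, List.map_cons, List.map_nil, List.drop_zero, Nat.sub_zero]
    refine congrArg₂ _ ?_ rfl
    exact List.take_of_length_le (by simp)
  | x :: t, hqh =>
    have hx : PySem.Chars.isupper x = true := hqh x t rfl
    have hq0 : pvStartsNat (x :: t) = 0 :: (pvStartsNat t).map (· + 1) := by
      rw [pvStartsNat, if_pos hx]
    unfold pvNatTokens
    rw [hst]
    have hzip : ((pvStartsNat (x :: t)).map (· + (d.length + 1))).zip
        (((pvStartsNat (x :: t)).map (· + (d.length + 1))).tail ++ [d.length + 1 + (x :: t).length])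
        = ((pvStartsNat (x :: t)).zip ((pvStartsNat (x :: t)).tail ++ [(x :: t).length])).map
            (Prod.map (· + (d.length + 1)) (· + (d.length + 1))) := by
      rw [← List.map_tail,
        show ((pvStartsNat (x :: t)).tail.map (· + (d.length + 1)) ++ [d.length + 1 + (x :: t).length])
            = ((pvStartsNat (x :: t)).tail ++ [(x :: t).length]).map (· + (d.length + 1)) by
          rw [List.map_append]; simp [Nat.add_comm],
        List.zip_map]
    have hfirst : (pvStartsNat (x :: t)).map (· + (d.length + 1))
        = (d.length + 1) :: ((pvStartsNat t).map (· + 1)).map (· + (d.length + 1)) := by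
      rw [hq0]; simp
    rw [List.tail_cons]
    rw [show ((pvStartsNat (x :: t)).map (· + (d.length + 1))) ++ [d.length + 1 + (x :: t).length]
          = (d.length + 1) :: (((pvStartsNat t).map (· + 1)).map (· + (d.length + 1))
              ++ [d.length + 1 + (x :: t).length]) by
        rw [hfirst]; simp]
    rw [List.zip_cons_cons, List.map_cons]
    refine congrArg₂ _ ?_ ?_
    · -- first token: prefix[0 : d.length+1] = c :: d
      simp only [List.drop_zero, Nat.sub_zero]
      calc (c :: d ++ x :: t).take (d.length + 1)
          = (c :: d ++ x :: t).take (c :: d).length := by simp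
        _ = c :: d := List.take_left
    · -- remaining tokens: those of q, positions shifted by d.length+1
      have htl : ((pvStartsNat t).map (· + 1)).map (· + (d.length + 1))
          = ((pvStartsNat (x :: t)).map (· + (d.length + 1))).tail := by
        rw [hq0]; simp
      rw [htl, hzip, List.map_map]
      refine List.map_congr_left ?_
      intro p _
      obtain ⟨a, b⟩ := p
      simp only [Function.comp_apply, Prod.map_apply]
      have hdrop : (c :: d ++ x :: t).drop (a + (d.length + 1)) = (x :: t).drop a := by
        rw [show a + (d.length + 1) = (c :: d).length + a from by simp; omega]
        exact List.drop_length_add_append a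
      rw [hdrop, show b + (d.length + 1) - (a + (d.length + 1)) = b - a from by omega]

-- main loop correspondence: A's scan equals B's staged computation, on any remaining input
theorem pvPartA_eq_natTokens (n : Nat) : ∀ cs : List Char, cs.length ≤ n →
    pvPartA (cs ++ ['\n'])
      = (pvNatTokens (cs.take (pvEnd cs 0)) (pvEnd cs 0)).map String.ofList := by
  induction n with
  | zero =>
    intro cs hn
    have : cs = [] := List.length_eq_zero_iff.mp (Nat.le_zero.mp hn)
    subst this
    simp [pvPartA, pvNatTokens, pvStartsNat, pvEnd,
      show PySem.Chars.isupper '\n' = false from by decide]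
  | succ n ih =>
    intro cs hn
    match cs with
    | [] =>
      simp [pvPartA, pvNatTokens, pvStartsNat, pvEnd,
        show PySem.Chars.isupper '\n' = false from by decide]
    | c :: cs =>
      by_cases hu : PySem.Chars.isupper c = true
      · -- one token c :: digits, then recurse on the remainder
        set d := (pvSpanDig cs).1 with hd
        set r := (pvSpanDig cs).2 with hr
        have hsplit : d ++ r = cs := pvSpanDig_append cs
        have hddig : ∀ x ∈ d, PySem.Chars.isdigit x = true := pvSpanDig_fst_digit cs
        have hrhead : ∀ x t, r = x :: t → PySem.Chars.isdigit x = false :=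
          fun x t hxt => pvSpanDig_snd_head cs x t (hr ▸ hxt)
        have hlen : pvLen cs = d.length + pvLen r := by
          rw [← hsplit]; exact pvLen_digits_append d r hddig
        have hE : pvEnd (c :: cs) 0 = d.length + 1 + pvLen r := by
          rw [pvEnd_zero, if_pos hu, hlen]; omega
        have hErec : pvEnd r 0 = pvLen r := pvEnd_zero_eq_pvLen r hrhead
        have hlenr : pvLen r ≤ r.length := pvLen_le r
        set q := r.take (pvLen r) with hq
        have hqlen : q.length = pvLen r := by
          rw [hq, List.length_take]; omega
        have htake : (c :: cs).take (pvEnd (c :: cs) 0) = (c :: d) ++ q := by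
          rw [List.cons_append, hE, show d.length + 1 + pvLen r = (d.length + pvLen r) + 1 from by omega,
            List.take_succ_cons, ← hsplit, List.take_length_add_append]
        have hqh : ∀ x t, q = x :: t → PySem.Chars.isupper x = true := by
          intro x t hxt
          have hrne : r ≠ [] := by
            intro h0; rw [hq, h0] at hxt; simp at hxt
          obtain ⟨y, r', hyr⟩ := List.exists_cons_of_ne_nil hrne
          have hy : PySem.Chars.isdigit y = false := hrhead y r' hyr
          have hpos : 0 < pvLen r := by
            by_contra hle
            have h0 : pvLen r = 0 := by omega
            rw [hq, h0] at hxt; simp at hxt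
          have hcond : (PySem.Chars.isupper y || PySem.Chars.isdigit y) = true := by
            by_contra hcf
            have hcf' : (PySem.Chars.isupper y || PySem.Chars.isdigit y) = false := by
              simpa using hcf
            rw [hyr, pvLen, if_neg (by simp [hcf'])] at hpos
            omega
          have hyU : PySem.Chars.isupper y = true := by
            rcases Bool.or_eq_true_iff.mp hcond with h' | h'
            · exact h'
            · rw [hy] at h'; cases h'
          obtain ⟨k, hk⟩ : ∃ k, pvLen r = k + 1 := ⟨pvLen r - 1, by omega⟩
          rw [hq, hyr] at hxt
          rw [show pvLen (y :: r') = k + 1 from by rw [← hyr]; exact hk,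
            List.take_succ_cons] at hxt
          injection hxt with h1 _
          rw [← h1]; exact hyU
        -- A's step
        have hA : pvPartA ((c :: cs) ++ ['\n'])
            = String.ofList (c :: d) :: pvPartA (r ++ ['\n']) := by
          rw [show (c :: cs) ++ ['\n'] = c :: (cs ++ ['\n']) from rfl, pvPartA]
          simp [hu, pvSpanDig_append_newline, ← hd, ← hr]
        -- sizes for the induction hypothesis
        have hrn : r.length ≤ n := by
          have h1 : d.length + r.length = cs.length := by
            rw [← hsplit] at *; simp
          simp at hn; omega
        rw [hA, ih r hrn, hErec, ← hq, htake, hE,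
          show d.length + 1 + pvLen r = d.length + 1 + q.length from by omega,
          pvNatTokens_cons c d q hu (fun x hx => pv_digit_not_upper x (hddig x hx)) hqh,
          hqlen, List.map_cons]
      · -- break immediately: no tokens
        have hE : pvEnd (c :: cs) 0 = 0 := by rw [pvEnd_zero, if_neg hu]
        rw [show (c :: cs) ++ ['\n'] = c :: (cs ++ ['\n']) from rfl, pvPartA]
        simp [hu, hE, pvNatTokens, pvStartsNat]

-- B's port, rewritten to the Nat-level staged computation
theorem Parting_alt_eq (s : String) :
    Parting_alt s
      = (pvNatTokens (s.toList.take (pvEnd s.toList 0)) (pvEnd s.toList 0)).map String.ofList := by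
  simp only [Parting_alt]
  rw [PySem.List.slice_to_natCast, pvStarts_eq, PySem.List.slice_from_one]
  rw [show (pvStartsNat ((s.toList).take (pvEnd s.toList 0))).map (fun k : Nat => (0 : Int) + (k : Int))
        = (pvStartsNat ((s.toList).take (pvEnd s.toList 0))).map (fun k : Nat => (k : Int)) from
      List.map_congr_left (fun a _ => by omega)]
  rw [← List.map_tail,
    show ([((pvEnd s.toList 0 : Nat) : Int)] : List Int)
        = ([pvEnd s.toList 0] : List Nat).map (fun k : Nat => (k : Int)) from rfl,
    ← List.map_append, List.zip_map, List.map_map]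
  unfold pvNatTokens
  rw [List.map_map]
  refine List.map_congr_left ?_
  intro p _
  obtain ⟨a, b⟩ := p
  simp only [Function.comp_apply, Prod.map_apply]
  rw [PySem.List.slice_natCast]

-- ===== VERDICT (by name: the statement is the Claim_ definition above) =====
theorem Parting_spec : Claim_equal_Parting := by
  intro s _
  unfold Spec_Parting Parting
  rw [Parting_alt_eq, pvPartA_eq_natTokens s.toList.length s.toList le_rfl]
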